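-- pv_equiv track=rewrite | github.com/devshid/tic-tac-toe-python | tic_tac_toe_terminal.py | row_match
-- ===== SOURCE A (Python) =====
-- def row_match(moves):
--     row = {}
--     for move in moves:
--         if str(move[0]) in row.keys():
--             row[str(move[0])] += 1
--         else:
--             row[str(move[0])] = 1
--     for r in row.values():
--         if r >= 3:
--             return True
--     return False
-- ===== SOURCE B (Python) =====
-- def row_match(moves):
--     keys = sorted(str(m[0]) for m in moves)
--     if not keys:
--         return False
--     prev = keys[0]
--     run = 1
--     for k in keys[1:]:
--         run = run + 1 if k == prev else 1
--         if run >= 3: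
--             return True
--         prev = k
--     return False
-- ===== Notes on version B (the rewrite author's own statement) =====
-- stated objective: alternative
-- what changed: Replaces A's frequency dict plus a scan over its values by sorting the str(move[0]) keys once and detecting a run of length 3 in a single pass with early exit.
import Mathlib
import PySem

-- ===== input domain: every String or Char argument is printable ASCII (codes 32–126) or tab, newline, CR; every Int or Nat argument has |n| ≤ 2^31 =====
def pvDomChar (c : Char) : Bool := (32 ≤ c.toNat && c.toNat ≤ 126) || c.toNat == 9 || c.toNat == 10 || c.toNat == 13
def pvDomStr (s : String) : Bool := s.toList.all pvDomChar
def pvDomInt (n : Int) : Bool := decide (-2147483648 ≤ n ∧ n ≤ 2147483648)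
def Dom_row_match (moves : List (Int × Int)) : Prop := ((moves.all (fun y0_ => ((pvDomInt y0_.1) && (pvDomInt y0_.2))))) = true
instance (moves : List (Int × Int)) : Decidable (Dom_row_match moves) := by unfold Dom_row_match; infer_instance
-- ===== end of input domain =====

-- B replaces A's frequency dict + value scan by sort-the-keys + one run-length pass (alternative algorithm, same results).

-- ===== PORT A =====
-- first loop of A: build the frequency dict keyed by str(move[0])
def rowDictA (moves : List (Int × Int)) : PySem.Dict String Int :=
  moves.foldl (fun row move =>
    if row.contains (PySem.Int.toStr move.1) then
      row.insert (PySem.Int.toStr move.1) (row.getD (PySem.Int.toStr move.1) 0 + 1)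
    else
      row.insert (PySem.Int.toStr move.1) 1) PySem.Dict.empty

-- second loop of A: early-exit scan over the dict's values
def anyGe3 : List Int → Bool
  | [] => false
  | r :: rest => if 3 ≤ r then true else anyGe3 rest

def row_match (moves : List (Int × Int)) : Bool :=
  anyGe3 (rowDictA moves).values

-- ===== PORT B =====
-- B's loop over keys[1:], carrying (prev, run) with early exit at run >= 3
def scanRunB (prev : String) (run : Int) : List String → Bool
  | [] => false
  | k :: rest =>
    let run' := if k == prev then run + 1 else 1
    if 3 ≤ run' then true else scanRunB k run' rest

def row_match_alt (moves : List (Int × Int)) : Bool :=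
  match PySem.List.sorted (moves.map (fun m => PySem.Int.toStr m.1)) (fun x => x) false with
  | [] => false
  | k :: rest => scanRunB k 1 rest

-- ===== PRECONDITION & SPEC =====
def Spec_row_match (moves : List (Int × Int)) (out : Bool) : Prop := out = row_match_alt moves
instance (moves : List (Int × Int)) (out : Bool) : Decidable (Spec_row_match moves out) := by unfold Spec_row_match; infer_instance

-- ===== CLAIM (what is proved, stated in full; the proofs are below) =====
def Claim_equal_row_match : Prop := ∀ (moves : List (Int × Int)), Dom_row_match moves → Spec_row_match moves (row_match moves)

-- ===== LEMMAS AND PROOFS =====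

-- A's dict is Counter(str(m[0]) for m in moves)
lemma rowDictA_eq_counter (moves : List (Int × Int)) :
    rowDictA moves = PySem.Dict.counter (moves.map (fun m => PySem.Int.toStr m.1)) := by
  unfold rowDictA
  have hcongr := PySem.List.foldl_congr_mem
    (l := moves) (init := (PySem.Dict.empty : PySem.Dict String Int))
    (f := fun row move =>
      if row.contains (PySem.Int.toStr move.1) then
        row.insert (PySem.Int.toStr move.1) (row.getD (PySem.Int.toStr move.1) 0 + 1)
      else
        row.insert (PySem.Int.toStr move.1) 1)
    (g := fun row move =>
      row.insert (PySem.Int.toStr move.1) (row.getD (PySem.Int.toStr move.1) 0 + 1))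
    (by
      intro acc x _
      by_cases h : acc.contains (PySem.Int.toStr x.1)
      · simp [h]
      · have h0 : acc.getD (PySem.Int.toStr x.1) 0 = 0 :=
          PySem.Dict.getD_of_not_contains acc 0 (by simpa using h)
        simp [h, h0])
  rw [hcongr,
    ← List.foldl_map (f := fun m : Int × Int => PySem.Int.toStr m.1)
        (g := fun (d : PySem.Dict String Int) k => d.insert k (d.getD k 0 + 1))]
  exact PySem.Dict.foldl_insert_getD_add_one_eq_counter _

lemma anyGe3_eq_any (l : List Int) : anyGe3 l = l.any (fun r => decide (3 ≤ r)) := by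
  induction l with
  | nil => rfl
  | cons r rest ih => by_cases h : (3:Int) ≤ r <;> simp [anyGe3, h, ih]

-- characterisation of A: some key occurs at least three times
lemma row_match_iff (moves : List (Int × Int)) :
    row_match moves = true ↔
      ∃ k ∈ moves.map (fun m => PySem.Int.toStr m.1),
        (3:Int) ≤ ((moves.map (fun m => PySem.Int.toStr m.1)).count k : Int) := by
  set ks := moves.map (fun m => PySem.Int.toStr m.1) with hks
  unfold row_match
  rw [rowDictA_eq_counter, ← hks, anyGe3_eq_any]
  have hv : (PySem.Dict.counter ks).values
      = (PySem.Set.ofList ks).map (fun k => ((ks.count k : Int))) := by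
    show ((PySem.Dict.counter ks).items).map Prod.snd = _
    rw [PySem.Dict.items_counter]
    simp [List.map_map, Function.comp]
  rw [hv]
  simp [List.any_map, List.any_eq_true, Function.comp, PySem.Set.mem_ofList]

-- run-length scan on a sorted tail: loop invariant
lemma scanRunB_iff (prev : String) (run : Int) (rest : List String)
    (hs : rest.Pairwise (· ≤ ·)) (hlb : ∀ x ∈ rest, prev ≤ x)
    (h1 : 1 ≤ run) (h2 : run ≤ 2) :
    scanRunB prev run rest = true ↔
      3 ≤ run + (rest.count prev : Int) ∨
        ∃ v ∈ rest, v ≠ prev ∧ (3:Int) ≤ (rest.count v : Int) := by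
  induction rest generalizing prev run with
  | nil => simp [scanRunB]; omega
  | cons k t ih =>
    have hst : t.Pairwise (· ≤ ·) := hs.of_cons
    have hkle : ∀ x ∈ t, k ≤ x := fun x hx => (List.pairwise_cons.1 hs).1 x hx
    by_cases hk : k = prev
    · subst hk
      by_cases h3 : (3:Int) ≤ run + 1
      · have hr2 : run = 2 := by omega
        subst hr2
        simp [scanRunB, List.count_cons]
        omega
      · have hr1 : run = 1 := by omega
        subst hr1
        have hstep : scanRunB k (1:Int) (k :: t) = scanRunB k 2 t := by
          simp [scanRunB]
        rw [hstep, ih k 2 hst hkle (by omega) (by omega)]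
        constructor
        · rintro (h | ⟨v, hv, hne, hc⟩)
          · left; simp; omega
          · right
            exact ⟨v, List.mem_cons_of_mem _ hv, hne,
              by simpa [List.count_cons, Ne.symm hne] using hc⟩
        · rintro (h | ⟨v, hv, hne, hc⟩)
          · left; simp at h; omega
          · rcases List.mem_cons.1 hv with rfl | hv'
            · exact absurd rfl hne
            · right
              exact ⟨v, hv', hne, by simpa [List.count_cons, Ne.symm hne] using hc⟩
    · -- key changed: run resets to 1, prev never occurs again
      have hpk : prev ≤ k := hlb k List.mem_cons_self
      have hprevt : prev ∉ t := fun h => hk (le_antisymm (hkle prev h) hpk)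
      have hcp : (k :: t).count prev = 0 := by
        simp [List.count_eq_zero.2 hprevt, hk]
      have hstep : scanRunB prev run (k :: t) = scanRunB k 1 t := by
        have : ¬ (3:Int) ≤ 1 := by omega
        simp [scanRunB, hk, this]
      rw [hstep, ih k 1 hst hkle (by omega) (by omega)]
      constructor
      · rintro (h | ⟨v, hv, hne, hc⟩)
        · right
          refine ⟨k, List.mem_cons_self, hk, ?_⟩
          simp; omega
        · have hvne : v ≠ prev := fun h => hprevt (h ▸ hv)
          right
          exact ⟨v, List.mem_cons_of_mem _ hv, hvne,
            by simpa [List.count_cons, Ne.symm hne] using hc⟩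
      · rintro (h | ⟨v, hv, hne, hc⟩)
        · rw [hcp] at h; push_cast at h; omega
        · by_cases hvk : v = k
          · subst hvk
            left
            simp at hc; omega
          · have hv' : v ∈ t := by
              rcases List.mem_cons.1 hv with rfl | h'
              · exact absurd rfl hvk
              · exact h'
            right
            exact ⟨v, hv', hvk, by simpa [List.count_cons, Ne.symm hvk] using hc⟩

-- characterisation of B: same property, through the sorted key list
lemma row_match_alt_iff (moves : List (Int × Int)) :
    row_match_alt moves = true ↔
      ∃ k ∈ moves.map (fun m => PySem.Int.toStr m.1),
        (3:Int) ≤ ((moves.map (fun m => PySem.Int.toStr m.1)).count k : Int) := by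
  set ks := moves.map (fun m => PySem.Int.toStr m.1) with hks
  have hperm : (PySem.List.sorted ks (fun x => x) false).Perm ks :=
    PySem.List.sorted_perm ks _ _
  have hpw : (PySem.List.sorted ks (fun x => x) false).Pairwise (· ≤ ·) := by
    simpa using PySem.List.sorted_pairwise ks (fun x => x)
  unfold row_match_alt
  rw [← hks]
  have key : (match PySem.List.sorted ks (fun x => x) false with
      | [] => false
      | k :: rest => scanRunB k 1 rest) = true ↔
      ∃ v ∈ PySem.List.sorted ks (fun x => x) false,
        (3:Int) ≤ ((PySem.List.sorted ks (fun x => x) false).count v : Int) := by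
    cases hsl : PySem.List.sorted ks (fun x => x) false with
    | nil => simp
    | cons k rest =>
      rw [hsl] at hpw
      rw [scanRunB_iff k 1 rest hpw.of_cons
        (fun x hx => (List.pairwise_cons.1 hpw).1 x hx) (by omega) (by omega)]
      constructor
      · rintro (h | ⟨v, hv, hne, hc⟩)
        · refine ⟨k, List.mem_cons_self, ?_⟩
          simp; omega
        · exact ⟨v, List.mem_cons_of_mem _ hv,
            by simpa [List.count_cons, Ne.symm hne] using hc⟩
      · rintro ⟨v, hv, hc⟩
        by_cases hvk : v = k
        · subst hvk
          left
          simp at hc; omega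
        · have hv' : v ∈ rest := by
            rcases List.mem_cons.1 hv with rfl | h'
            · exact absurd rfl hvk
            · exact h'
          right
          exact ⟨v, hv', hvk, by simpa [List.count_cons, Ne.symm hvk] using hc⟩
  rw [key]
  constructor
  · rintro ⟨v, hv, hc⟩
    exact ⟨v, hperm.mem_iff.1 hv, by rwa [hperm.count_eq] at hc⟩
  · rintro ⟨v, hv, hc⟩
    exact ⟨v, hperm.mem_iff.2 hv, by rwa [hperm.count_eq]⟩

-- ===== VERDICT (by name: the statement is the Claim_ definition above) =====
theorem row_match_spec : Claim_equal_row_match := by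
  intro moves _
  unfold Spec_row_match
  rw [Bool.eq_iff_iff, row_match_iff, row_match_alt_iff]
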